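-- pv_equiv track=rewrite | github.com/MrBrantCode/unitest_baseline | mut_generate/mist_train_taco/taco_5534/solution.py | count_paths_with_special_fields
-- ===== SOURCE A (Python) =====
-- def count_paths_with_special_fields(n, m, k, special_fields):
--     MOD = 1000007
--
--     # Initialize the special grid
--     special = [[False for _ in range(m)] for _ in range(n)]
--     for (r, c) in special_fields:
--         special[r - 1][c - 1] = True
--
--     # Initialize the DP table
--     dp = [[[0 for _ in range(k + 1)] for _ in range(m)] for _ in range(n)]
--
--     # Base cases for the first row
--     for k_val in range(k + 1):
--         special_count = 0
--         for j in range(m):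
--             if special[0][j]:
--                 special_count += 1
--             if special_count <= k_val:
--                 dp[0][j][k_val] = 1
--
--     # Base cases for the first column
--     for k_val in range(k + 1):
--         special_count = 0
--         for i in range(n):
--             if special[i][0]:
--                 special_count += 1
--             if special_count <= k_val:
--                 dp[i][0][k_val] = 1
--
--     # Fill the DP table
--     for i in range(1, n):
--         for j in range(1, m):
--             for k_val in range(k + 1):
--                 if not special[i][j]:
--                     dp[i][j][k_val] = (dp[i - 1][j][k_val] + dp[i][j - 1][k_val]) % MOD
--                 elif k_val > 0:
--                     dp[i][j][k_val] = (dp[i - 1][j][k_val - 1] + dp[i][j - 1][k_val - 1]) % MOD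
--
--     # Calculate the final answer
--     ans = [0] * (k + 1)
--     ans[0] = dp[n - 1][m - 1][0]
--     for k_val in range(1, k + 1):
--         ans[k_val] = (dp[n - 1][m - 1][k_val] - dp[n - 1][m - 1][k_val - 1]) % MOD
--
--     return ans
-- ===== SOURCE B (Python) =====
-- def count_paths_with_special_fields(n, m, k, special_fields):
--     MOD = 1000007
--     special = [[False for _ in range(m)] for _ in range(n)]
--     for (r, c) in special_fields:
--         special[r - 1][c - 1] = True
--     # dp over "exactly c special fields visited": one row at a time, no final differencing
--     prev = []
--     for i in range(n):
--         cur = []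
--         for j in range(m):
--             s = 1 if special[i][j] else 0
--             cell = [0 if c < s else
--                     ((1 if c == s else 0) if i == 0 and j == 0 else
--                      ((prev[j][c - s] if i > 0 else 0)
--                       + (cur[j - 1][c - s] if j > 0 else 0)) % MOD)
--                     for c in range(k + 1)]
--             cur.append(cell)
--         prev = cur
--     return prev[m - 1]
-- ===== Notes on version B (the rewrite author's own statement) =====
-- stated objective: alternative
-- what changed: The DP's third axis is redefined from 'at most c special fields' to 'exactly c special fields', with unified base cases folded into one row-rolling recurrence (dp[j][c]=(up+left) mod M shifted by the cell's special flag), so A's two separate base-case passes, full 3-D table and final cumulative-difference step all disappear and the last row's cells are returned directly.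
import Mathlib
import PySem

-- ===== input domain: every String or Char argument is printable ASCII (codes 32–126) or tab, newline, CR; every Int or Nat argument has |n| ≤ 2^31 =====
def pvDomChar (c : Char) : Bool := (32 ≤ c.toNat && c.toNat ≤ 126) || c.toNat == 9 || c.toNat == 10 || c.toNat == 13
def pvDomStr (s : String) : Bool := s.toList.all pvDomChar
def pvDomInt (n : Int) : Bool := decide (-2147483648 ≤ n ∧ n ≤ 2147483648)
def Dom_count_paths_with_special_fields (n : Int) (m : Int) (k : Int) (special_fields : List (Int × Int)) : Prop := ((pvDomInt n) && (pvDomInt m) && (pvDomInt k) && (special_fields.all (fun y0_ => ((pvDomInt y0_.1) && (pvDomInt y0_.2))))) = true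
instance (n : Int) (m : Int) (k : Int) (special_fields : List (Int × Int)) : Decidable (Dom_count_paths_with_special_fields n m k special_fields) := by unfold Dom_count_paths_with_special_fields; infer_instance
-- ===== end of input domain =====

-- B redefines the DP's count axis from "at most c specials" to "exactly c specials", rolling one
-- row at a time with a single unified recurrence, so A's two base-case passes, full 3-D table and
-- final cumulative-difference step disappear (objective: alternative, same O(n*m*k) cost).

-- ===== PORT A =====
-- shared by both ports: the `special` boolean grid (both Pythons build it with the same two lines)
def pvMkSpecial (n : Int) (m : Int) (special_fields : List (Int × Int)) : List (List Bool) :=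
  special_fields.foldl
    (fun g rc =>
      PySem.List.pySetD g (rc.1 - 1)
        (PySem.List.pySetD (PySem.List.pyGetD g (rc.1 - 1) []) (rc.2 - 1) true))
    ((PySem.List.pyRange 0 n 1).map (fun _ => (PySem.List.pyRange 0 m 1).map (fun _ => false)))

def pvGet2B (g : List (List Bool)) (i : Int) (j : Int) : Bool :=
  PySem.List.pyGetD (PySem.List.pyGetD g i []) j false

def pvGet3 (d : List (List (List Int))) (i : Int) (j : Int) (c : Int) : Int :=
  PySem.List.pyGetD (PySem.List.pyGetD (PySem.List.pyGetD d i []) j []) c 0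

-- dp[i][j][c] = v (Python's in-place assignment on nested lists)
def pvSet3 (d : List (List (List Int))) (i : Int) (j : Int) (c : Int) (v : Int) :
    List (List (List Int)) :=
  PySem.List.pySetD d i
    (PySem.List.pySetD (PySem.List.pyGetD d i []) j
      (PySem.List.pySetD (PySem.List.pyGetD (PySem.List.pyGetD d i []) j []) c v))

def count_paths_with_special_fields (n : Int) (m : Int) (k : Int) (special_fields : List (Int × Int)) : List Int :=
  let M : Int := 1000007
  let special := pvMkSpecial n m special_fields
  let dp : List (List (List Int)) :=
    (PySem.List.pyRange 0 n 1).map (fun _ =>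
      (PySem.List.pyRange 0 m 1).map (fun _ =>
        (PySem.List.pyRange 0 (k + 1) 1).map (fun _ => (0 : Int))))
  -- base cases for the first row
  let dp := (PySem.List.pyRange 0 (k + 1) 1).foldl (fun dp kv =>
      ((PySem.List.pyRange 0 m 1).foldl (fun (st : Int × List (List (List Int))) j =>
          let sc := if pvGet2B special 0 j then st.1 + 1 else st.1
          (sc, if sc ≤ kv then pvSet3 st.2 0 j kv 1 else st.2))
        ((0 : Int), dp)).2) dp
  -- base cases for the first column
  let dp := (PySem.List.pyRange 0 (k + 1) 1).foldl (fun dp kv =>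
      ((PySem.List.pyRange 0 n 1).foldl (fun (st : Int × List (List (List Int))) i =>
          let sc := if pvGet2B special i 0 then st.1 + 1 else st.1
          (sc, if sc ≤ kv then pvSet3 st.2 i 0 kv 1 else st.2))
        ((0 : Int), dp)).2) dp
  -- fill the DP table
  let dp := (PySem.List.pyRange 1 n 1).foldl (fun dp i =>
      (PySem.List.pyRange 1 m 1).foldl (fun dp j =>
        (PySem.List.pyRange 0 (k + 1) 1).foldl (fun dp kv =>
          if ¬ pvGet2B special i j then
            pvSet3 dp i j kv (PySem.Int.mod (pvGet3 dp (i - 1) j kv + pvGet3 dp i (j - 1) kv) M)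
          else if kv > 0 then
            pvSet3 dp i j kv
              (PySem.Int.mod (pvGet3 dp (i - 1) j (kv - 1) + pvGet3 dp i (j - 1) (kv - 1)) M)
          else dp) dp) dp) dp
  -- calculate the final answer
  let ans : List Int := List.replicate (k + 1).toNat (0 : Int)
  let ans := PySem.List.pySetD ans 0 (pvGet3 dp (n - 1) (m - 1) 0)
  let ans := (PySem.List.pyRange 1 (k + 1) 1).foldl (fun a kv =>
      PySem.List.pySetD a kv
        (PySem.Int.mod (pvGet3 dp (n - 1) (m - 1) kv - pvGet3 dp (n - 1) (m - 1) (kv - 1)) M)) ans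
  ans

-- ===== PORT B =====
def count_paths_with_special_fields_alt (n : Int) (m : Int) (k : Int) (special_fields : List (Int × Int)) : List Int :=
  let M : Int := 1000007
  let special := pvMkSpecial n m special_fields
  let prev : List (List Int) := []
  let prev := (PySem.List.pyRange 0 n 1).foldl (fun prev i =>
      (PySem.List.pyRange 0 m 1).foldl (fun cur j =>
        let s : Int := if pvGet2B special i j then 1 else 0
        let cell := (PySem.List.pyRange 0 (k + 1) 1).map (fun c =>
          if c < s then 0
          else if i == 0 && j == 0 then (if c == s then 1 else 0)
          else PySem.Int.mod
            ((if i > 0 then PySem.List.pyGetD (PySem.List.pyGetD prev j []) (c - s) 0 else 0)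
              + (if j > 0 then PySem.List.pyGetD (PySem.List.pyGetD cur (j - 1) []) (c - s) 0
                 else 0)) M)
        cur ++ [cell]) []) prev
  PySem.List.pyGetD prev (m - 1) []

-- ===== PRECONDITION & SPEC =====
-- Pre_ is exactly where Python A returns normally: n,m ≥ 1, k ≥ 0 and every special-field
-- coordinate inside Python's (negative-index-tolerant) list-index range; outside, A raises IndexError.
def Pre_count_paths_with_special_fields (n : Int) (m : Int) (k : Int) (special_fields : List (Int × Int)) : Prop :=
  1 ≤ n ∧ 1 ≤ m ∧ 0 ≤ k ∧
    ∀ p ∈ special_fields, 1 - n ≤ p.1 ∧ p.1 ≤ n ∧ 1 - m ≤ p.2 ∧ p.2 ≤ m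
instance (n : Int) (m : Int) (k : Int) (special_fields : List (Int × Int)) : Decidable (Pre_count_paths_with_special_fields n m k special_fields) := by unfold Pre_count_paths_with_special_fields; infer_instance

def pvWitness_count_paths_with_special_fields : Int × Int × Int × (List (Int × Int)) :=
  (2, 3, 1, [(1, 2)])

def Spec_count_paths_with_special_fields (n : Int) (m : Int) (k : Int) (special_fields : List (Int × Int)) (out : List Int) : Prop := out = count_paths_with_special_fields_alt n m k special_fields
instance (n : Int) (m : Int) (k : Int) (special_fields : List (Int × Int)) (out : List Int) : Decidable (Spec_count_paths_with_special_fields n m k special_fields out) := by unfold Spec_count_paths_with_special_fields; infer_instance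

-- ===== CLAIM (what is proved, stated in full; the proofs are below) =====
def Claim_equal_count_paths_with_special_fields : Prop := ∀ (n : Int) (m : Int) (k : Int) (special_fields : List (Int × Int)), Dom_count_paths_with_special_fields n m k special_fields → Pre_count_paths_with_special_fields n m k special_fields → Spec_count_paths_with_special_fields n m k special_fields (count_paths_with_special_fields n m k special_fields)

-- ===== LEMMAS AND PROOFS =====

-- casts for ranges
theorem pv_pyRange_zero_cast (b : Int) :
    PySem.List.pyRange 0 b 1 = (List.range b.toNat).map (fun c : Nat => (c : Int)) := by
  rw [PySem.List.pyRange_one]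
  simp

theorem pv_pyRange_one_cast (b : Int) :
    PySem.List.pyRange 1 b 1 = (List.range (b - 1).toNat).map (fun u : Nat => ((u + 1 : Nat) : Int)) := by
  rw [PySem.List.pyRange_one]
  apply List.map_congr_left
  intro u _
  push_cast
  ring

-- the special-cell lookup both ports perform, Nat-indexed
def pvG (sp : List (List Bool)) (i j : Nat) : Bool := pvGet2B sp (i : Int) (j : Int)

def pvS (g : Nat → Nat → Bool) (i j : Nat) : Nat := if g i j then 1 else 0

def pvRCp (g : Nat → Nat → Bool) : Nat → Nat
  | 0 => 0
  | t + 1 => pvRCp g t + pvS g 0 t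

def pvCCp (g : Nat → Nat → Bool) : Nat → Nat
  | 0 => 0
  | t + 1 => pvCCp g t + pvS g t 0

-- B's DP: paths to (i,j) visiting exactly c special cells (mod 1000007)
def pvE (g : Nat → Nat → Bool) : Nat → Nat → Nat → Int
  | 0, 0, c => if c = pvS g 0 0 then 1 else 0
  | 0, j + 1, c =>
      if c < pvS g 0 (j + 1) then 0
      else PySem.Int.mod (0 + pvE g 0 j (c - pvS g 0 (j + 1))) 1000007
  | i + 1, 0, c =>
      if c < pvS g (i + 1) 0 then 0
      else PySem.Int.mod (pvE g i 0 (c - pvS g (i + 1) 0) + 0) 1000007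
  | i + 1, j + 1, c =>
      if c < pvS g (i + 1) (j + 1) then 0
      else PySem.Int.mod
        (pvE g i (j + 1) (c - pvS g (i + 1) (j + 1))
          + pvE g (i + 1) j (c - pvS g (i + 1) (j + 1))) 1000007

-- A's DP: paths to (i,j) visiting at most c special cells (mod 1000007)
def pvF (g : Nat → Nat → Bool) : Nat → Nat → Nat → Int
  | 0, j, c => if pvRCp g (j + 1) ≤ c then 1 else 0
  | i + 1, 0, c => if pvCCp g (i + 2) ≤ c then 1 else 0
  | i + 1, j + 1, c =>
      if g (i + 1) (j + 1) = false then
        PySem.Int.mod (pvF g i (j + 1) c + pvF g (i + 1) j c) 1000007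
      else if 0 < c then
        PySem.Int.mod (pvF g i (j + 1) (c - 1) + pvF g (i + 1) j (c - 1)) 1000007
      else 0

def pvTab (N Mn K1 : Nat) (f : Nat → Nat → Nat → Int) : List (List (List Int)) :=
  (List.range N).map fun i => (List.range Mn).map fun j => (List.range K1).map fun c => f i j c

theorem pv_set_map_range {α : Type} (N i : Nat) (f : Nat → α) (v : α) :
    ((List.range N).map f).set i v
      = (List.range N).map (fun x => if x = i then v else f x) := by
  apply List.ext_getElem
  · simp
  · intro t h1 h2
    simp only [List.getElem_set, List.getElem_map, List.getElem_range]
    by_cases h : i = t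
    · subst h
      simp
    · rw [if_neg h, if_neg (fun hh => h hh.symm)]

theorem pv_getD_map_range {α : Type} (N i : Nat) (f : Nat → α) (d : α) (h : i < N) :
    ((List.range N).map f).getD i d = f i := by
  rw [List.getD_eq_getElem?_getD]
  simp [h]

theorem pvTab_get (N Mn K1 : Nat) (f : Nat → Nat → Nat → Int) {i j c : Nat}
    (hi : i < N) (hj : j < Mn) (hc : c < K1) :
    pvGet3 (pvTab N Mn K1 f) (i : Int) (j : Int) (c : Int) = f i j c := by
  unfold pvGet3 pvTab
  simp only [PySem.List.pyGetD_natCast]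
  rw [pv_getD_map_range _ _ _ _ hi, pv_getD_map_range _ _ _ _ hj,
    pv_getD_map_range _ _ _ _ hc]

theorem pvTab_set (N Mn K1 : Nat) (f : Nat → Nat → Nat → Int) {i j c : Nat}
    (hi : i < N) (hj : j < Mn) (hc : c < K1) (v : Int) :
    pvSet3 (pvTab N Mn K1 f) (i : Int) (j : Int) (c : Int) v
      = pvTab N Mn K1 (fun i' j' c' => if i' = i ∧ j' = j ∧ c' = c then v else f i' j' c') := by
  unfold pvSet3 pvTab
  simp only [PySem.List.pySetD_natCast, PySem.List.pyGetD_natCast]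
  rw [pv_getD_map_range _ _ _ _ hi, pv_getD_map_range _ _ _ _ hj,
    pv_set_map_range, pv_set_map_range, pv_set_map_range]
  apply List.map_congr_left
  intro a ha
  simp only [List.mem_range] at ha
  by_cases hai : a = i
  · subst hai
    rw [if_pos rfl]
    apply List.map_congr_left
    intro b hb
    by_cases hbj : b = j
    · subst hbj
      rw [if_pos rfl]
      apply List.map_congr_left
      intro d hd
      by_cases hdc : d = c
      · subst hdc
        simp
      · simp [hdc]
    · rw [if_neg hbj]
      apply List.map_congr_left
      intro d hd
      simp [hbj]
  · rw [if_neg hai]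
    apply List.map_congr_left
    intro b hb
    apply List.map_congr_left
    intro d hd
    simp [hai]

theorem pvTab_congr (N Mn K1 : Nat) {f f' : Nat → Nat → Nat → Int}
    (h : ∀ i < N, ∀ j < Mn, ∀ c < K1, f i j c = f' i j c) :
    pvTab N Mn K1 f = pvTab N Mn K1 f' := by
  unfold pvTab
  apply List.map_congr_left
  intro i hi
  apply List.map_congr_left
  intro j hj
  apply List.map_congr_left
  intro c hc
  exact h i (by simpa using hi) j (by simpa using hj) c (by simpa using hc)

-- ===== phase 1: base cases for the first row =====
theorem pv_rowbase_inner (sp : List (List Bool)) (N Mn K1 : Nat)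
    (f : Nat → Nat → Nat → Int) (kv : Nat) (hN : 0 < N) (hkv : kv < K1)
    (t : Nat) (ht : t ≤ Mn) :
    (List.range t).foldl
      (fun (st : Int × List (List (List Int))) (j : Nat) =>
        let sc := if pvGet2B sp 0 (j : Int) then st.1 + 1 else st.1
        (sc, if sc ≤ (kv : Int) then pvSet3 st.2 0 (j : Int) (kv : Int) 1 else st.2))
      (0, pvTab N Mn K1 f)
    = ((pvRCp (pvG sp) t : Int),
        pvTab N Mn K1 (fun i j c =>
          if i = 0 ∧ j < t ∧ c = kv ∧ pvRCp (pvG sp) (j + 1) ≤ kv then 1 else f i j c)) := by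
  induction t with
  | zero =>
    refine Prod.ext (by simp [pvRCp]) ?_
    exact (pvTab_congr _ _ _ (by intro i hi j hj c hc; simp)).symm
  | succ t ih =>
    rw [List.range_succ, List.foldl_append, ih (by omega), List.foldl_cons, List.foldl_nil]
    have hg : pvGet2B sp 0 ((t : Nat) : Int) = pvG sp 0 t := by
      simp [pvG]
    have hsc : (if pvGet2B sp 0 ((t : Nat) : Int)
          then ((pvRCp (pvG sp) t : Nat) : Int) + 1 else ((pvRCp (pvG sp) t : Nat) : Int))
        = ((pvRCp (pvG sp) (t + 1) : Nat) : Int) := by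
      rw [hg]
      show _ = ((pvRCp (pvG sp) t + pvS (pvG sp) 0 t : Nat) : Int)
      unfold pvS
      cases h : pvG sp 0 t <;> simp
    dsimp only
    rw [hsc]
    refine Prod.ext rfl ?_
    by_cases hle : pvRCp (pvG sp) (t + 1) ≤ kv
    · rw [if_pos (by exact_mod_cast hle)]
      rw [show (0 : Int) = ((0 : Nat) : Int) from rfl,
        pvTab_set N Mn K1 _ hN (by omega) hkv]
      apply pvTab_congr
      intro i hi j hj c hc
      by_cases hij : i = 0 ∧ j = t ∧ c = kv
      · obtain ⟨h1, h2, h3⟩ := hij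
        subst h1 h2 h3
        rw [if_pos ⟨rfl, rfl, rfl⟩, if_pos ⟨rfl, by omega, rfl, hle⟩]
      · rw [if_neg (by tauto)]
        by_cases hij2 : i = 0 ∧ j < t ∧ c = kv ∧ pvRCp (pvG sp) (j + 1) ≤ kv
        · obtain ⟨h1, h2, h3, h4⟩ := hij2
          subst h1 h3
          rw [if_pos ⟨rfl, h2, rfl, h4⟩, if_pos ⟨rfl, by omega, rfl, h4⟩]
        · rw [if_neg (by
            rintro ⟨h1, h2, h3, h4⟩
            exact hij2 ⟨h1, h2, h3, h4⟩), if_neg (by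
            rintro ⟨h1, h2, h3, h4⟩
            by_cases hjt : j = t
            · exact hij ⟨h1, hjt, h3⟩
            · exact hij2 ⟨h1, by omega, h3, h4⟩)]
    · rw [if_neg (by exact_mod_cast hle)]
      apply pvTab_congr
      intro i hi j hj c hc
      by_cases hij2 : i = 0 ∧ j < t ∧ c = kv ∧ pvRCp (pvG sp) (j + 1) ≤ kv
      · obtain ⟨h1, h2, h3, h4⟩ := hij2
        subst h1 h3
        rw [if_pos ⟨rfl, h2, rfl, h4⟩, if_pos ⟨rfl, by omega, rfl, h4⟩]
      · rw [if_neg hij2, if_neg ?_]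
        rintro ⟨h1, h2, h3, h4⟩
        by_cases hjt : j = t
        · subst hjt
          exact hle h4
        · exact hij2 ⟨h1, by omega, h3, h4⟩

theorem pv_rowbase (sp : List (List Bool)) (N Mn K1 : Nat)
    (f : Nat → Nat → Nat → Int) (hN : 0 < N)
    (t : Nat) (ht : t ≤ K1) :
    (List.range t).foldl
      (fun dp (kv : Nat) =>
        ((List.range Mn).foldl
          (fun (st : Int × List (List (List Int))) (j : Nat) =>
            let sc := if pvGet2B sp 0 (j : Int) then st.1 + 1 else st.1
            (sc, if sc ≤ (kv : Int) then pvSet3 st.2 0 (j : Int) (kv : Int) 1 else st.2))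
          (0, dp)).2)
      (pvTab N Mn K1 f)
    = pvTab N Mn K1 (fun i j c =>
        if i = 0 ∧ c < t ∧ pvRCp (pvG sp) (j + 1) ≤ c then 1 else f i j c) := by
  induction t generalizing f with
  | zero =>
    exact (pvTab_congr _ _ _ (by intro i hi j hj c hc; simp)).symm
  | succ t ih =>
    rw [List.range_succ, List.foldl_append, ih _ (by omega), List.foldl_cons, List.foldl_nil]
    rw [pv_rowbase_inner sp N Mn K1 _ t hN (by omega) Mn le_rfl]
    apply pvTab_congr
    intro i hi j hj c hc
    split_ifs <;> first | rfl | omega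
  

-- ===== phase 2: base cases for the first column =====
theorem pv_colbase_inner (sp : List (List Bool)) (N Mn K1 : Nat)
    (f : Nat → Nat → Nat → Int) (kv : Nat) (hM : 0 < Mn) (hkv : kv < K1)
    (t : Nat) (ht : t ≤ N) :
    (List.range t).foldl
      (fun (st : Int × List (List (List Int))) (i : Nat) =>
        let sc := if pvGet2B sp (i : Int) 0 then st.1 + 1 else st.1
        (sc, if sc ≤ (kv : Int) then pvSet3 st.2 (i : Int) 0 (kv : Int) 1 else st.2))
      (0, pvTab N Mn K1 f)
    = ((pvCCp (pvG sp) t : Int),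
        pvTab N Mn K1 (fun i j c =>
          if j = 0 ∧ i < t ∧ c = kv ∧ pvCCp (pvG sp) (i + 1) ≤ kv then 1 else f i j c)) := by
  induction t with
  | zero =>
    refine Prod.ext (by simp [pvCCp]) ?_
    exact (pvTab_congr _ _ _ (by intro i hi j hj c hc; simp)).symm
  | succ t ih =>
    rw [List.range_succ, List.foldl_append, ih (by omega), List.foldl_cons, List.foldl_nil]
    have hg : pvGet2B sp ((t : Nat) : Int) 0 = pvG sp t 0 := by
      simp [pvG]
    have hsc : (if pvGet2B sp ((t : Nat) : Int) 0
          then ((pvCCp (pvG sp) t : Nat) : Int) + 1 else ((pvCCp (pvG sp) t : Nat) : Int))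
        = ((pvCCp (pvG sp) (t + 1) : Nat) : Int) := by
      rw [hg]
      show _ = ((pvCCp (pvG sp) t + pvS (pvG sp) t 0 : Nat) : Int)
      unfold pvS
      cases h : pvG sp t 0 <;> simp
    dsimp only
    rw [hsc]
    refine Prod.ext rfl ?_
    by_cases hle : pvCCp (pvG sp) (t + 1) ≤ kv
    · rw [if_pos (by exact_mod_cast hle)]
      rw [show (0 : Int) = ((0 : Nat) : Int) from rfl,
        pvTab_set N Mn K1 _ (by omega) hM hkv]
      apply pvTab_congr
      intro i hi j hj c hc
      by_cases hij : i = t ∧ j = 0 ∧ c = kv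
      · obtain ⟨h1, h2, h3⟩ := hij
        subst h1 h2 h3
        rw [if_pos ⟨rfl, rfl, rfl⟩, if_pos ⟨rfl, by omega, rfl, hle⟩]
      · rw [if_neg (by tauto)]
        by_cases hij2 : j = 0 ∧ i < t ∧ c = kv ∧ pvCCp (pvG sp) (i + 1) ≤ kv
        · obtain ⟨h1, h2, h3, h4⟩ := hij2
          subst h1 h3
          rw [if_pos ⟨rfl, h2, rfl, h4⟩, if_pos ⟨rfl, by omega, rfl, h4⟩]
        · rw [if_neg (by
            rintro ⟨h1, h2, h3, h4⟩
            exact hij2 ⟨h1, h2, h3, h4⟩), if_neg (by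
            rintro ⟨h1, h2, h3, h4⟩
            by_cases hit : i = t
            · exact hij ⟨hit, h1, h3⟩
            · exact hij2 ⟨h1, by omega, h3, h4⟩)]
    · rw [if_neg (by exact_mod_cast hle)]
      apply pvTab_congr
      intro i hi j hj c hc
      by_cases hij2 : j = 0 ∧ i < t ∧ c = kv ∧ pvCCp (pvG sp) (i + 1) ≤ kv
      · obtain ⟨h1, h2, h3, h4⟩ := hij2
        subst h1 h3
        rw [if_pos ⟨rfl, h2, rfl, h4⟩, if_pos ⟨rfl, by omega, rfl, h4⟩]
      · rw [if_neg hij2, if_neg ?_]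
        rintro ⟨h1, h2, h3, h4⟩
        by_cases hit : i = t
        · subst hit
          exact hle h4
        · exact hij2 ⟨h1, by omega, h3, h4⟩

theorem pv_colbase (sp : List (List Bool)) (N Mn K1 : Nat)
    (f : Nat → Nat → Nat → Int) (hM : 0 < Mn)
    (t : Nat) (ht : t ≤ K1) :
    (List.range t).foldl
      (fun dp (kv : Nat) =>
        ((List.range N).foldl
          (fun (st : Int × List (List (List Int))) (i : Nat) =>
            let sc := if pvGet2B sp (i : Int) 0 then st.1 + 1 else st.1
            (sc, if sc ≤ (kv : Int) then pvSet3 st.2 (i : Int) 0 (kv : Int) 1 else st.2))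
          (0, dp)).2)
      (pvTab N Mn K1 f)
    = pvTab N Mn K1 (fun i j c =>
        if j = 0 ∧ c < t ∧ pvCCp (pvG sp) (i + 1) ≤ c then 1 else f i j c) := by
  induction t generalizing f with
  | zero =>
    exact (pvTab_congr _ _ _ (by intro i hi j hj c hc; simp)).symm
  | succ t ih =>
    rw [List.range_succ, List.foldl_append, ih _ (by omega), List.foldl_cons, List.foldl_nil]
    rw [pv_colbase_inner sp N Mn K1 _ t hM (by omega) N le_rfl]
    apply pvTab_congr
    intro i hi j hj c hc
    split_ifs <;> first | rfl | omega
  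

-- ===== phase 3: fill =====
theorem pvF_interior (g : Nat → Nat → Bool) {i j : Nat} (hi : 0 < i) (hj : 0 < j) (c : Nat) :
    pvF g i j c =
      if g i j = false then
        PySem.Int.mod (pvF g (i - 1) j c + pvF g i (j - 1) c) 1000007
      else if 0 < c then
        PySem.Int.mod (pvF g (i - 1) j (c - 1) + pvF g i (j - 1) (c - 1)) 1000007
      else 0 := by
  obtain ⟨i', rfl⟩ : ∃ i', i = i' + 1 := ⟨i - 1, by omega⟩
  obtain ⟨j', rfl⟩ : ∃ j', j = j' + 1 := ⟨j - 1, by omega⟩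
  simp only [Nat.add_sub_cancel]
  rw [pvF]

theorem pv_fill_inner (sp : List (List Bool)) (N Mn K1 : Nat)
    (f : Nat → Nat → Nat → Int) (i j : Nat)
    (hi : 0 < i) (hiN : i < N) (hj : 0 < j) (hjM : j < Mn)
    (hup : ∀ c < K1, f (i - 1) j c = pvF (pvG sp) (i - 1) j c)
    (hleft : ∀ c < K1, f i (j - 1) c = pvF (pvG sp) i (j - 1) c)
    (hcell : ∀ c < K1, f i j c = 0)
    (t : Nat) (ht : t ≤ K1) :
    (List.range t).foldl
      (fun dp (kv : Nat) =>
        if ¬ pvGet2B sp (i : Int) (j : Int) then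
          pvSet3 dp (i : Int) (j : Int) (kv : Int)
            (PySem.Int.mod (pvGet3 dp ((i : Int) - 1) (j : Int) (kv : Int)
              + pvGet3 dp (i : Int) ((j : Int) - 1) (kv : Int)) 1000007)
        else if (kv : Int) > 0 then
          pvSet3 dp (i : Int) (j : Int) (kv : Int)
            (PySem.Int.mod (pvGet3 dp ((i : Int) - 1) (j : Int) ((kv : Int) - 1)
              + pvGet3 dp (i : Int) ((j : Int) - 1) ((kv : Int) - 1)) 1000007)
        else dp)
      (pvTab N Mn K1 f)
    = pvTab N Mn K1 (fun i' j' c' =>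
        if i' = i ∧ j' = j ∧ c' < t then pvF (pvG sp) i j c' else f i' j' c') := by
  have hgd : pvGet2B sp (i : Int) (j : Int) = pvG sp i j := rfl
  have hci : ((i : Nat) : Int) - 1 = ((i - 1 : Nat) : Int) := by omega
  have hcj : ((j : Nat) : Int) - 1 = ((j - 1 : Nat) : Int) := by omega
  induction t with
  | zero =>
    exact (pvTab_congr _ _ _ (by intro i' hi' j' hj' c' hc'; simp)).symm
  | succ t ih =>
    rw [List.range_succ, List.foldl_append, ih (by omega), List.foldl_cons, List.foldl_nil]
    have hup' : ∀ c < K1,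
        pvGet3 (pvTab N Mn K1 (fun i' j' c' =>
          if i' = i ∧ j' = j ∧ c' < t then pvF (pvG sp) i j c' else f i' j' c'))
          ((i : Int) - 1) (j : Int) (c : Int) = pvF (pvG sp) (i - 1) j c := by
      intro c hc
      rw [hci, pvTab_get _ _ _ _ (by omega) hjM hc, if_neg (by omega), hup c hc]
    have hleft' : ∀ c < K1,
        pvGet3 (pvTab N Mn K1 (fun i' j' c' =>
          if i' = i ∧ j' = j ∧ c' < t then pvF (pvG sp) i j c' else f i' j' c'))
          (i : Int) ((j : Int) - 1) (c : Int) = pvF (pvG sp) i (j - 1) c := by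
      intro c hc
      rw [hcj, pvTab_get _ _ _ _ hiN (by omega) hc, if_neg (by omega), hleft c hc]
    have hfin : ∀ v, v = pvF (pvG sp) i j t →
        pvSet3 (pvTab N Mn K1 (fun i' j' c' =>
          if i' = i ∧ j' = j ∧ c' < t then pvF (pvG sp) i j c' else f i' j' c'))
          (i : Int) (j : Int) (t : Int) v
        = pvTab N Mn K1 (fun i' j' c' =>
            if i' = i ∧ j' = j ∧ c' < t + 1 then pvF (pvG sp) i j c' else f i' j' c') := by
      intro v hv
      rw [pvTab_set N Mn K1 _ hiN hjM ht, hv]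
      apply pvTab_congr
      intro i' hi' j' hj' c' hc'
      by_cases h1 : i' = i ∧ j' = j ∧ c' = t
      · obtain ⟨e1, e2, e3⟩ := h1
        subst e1 e2 e3
        rw [if_pos ⟨rfl, rfl, rfl⟩, if_pos ⟨rfl, rfl, by omega⟩]
      · rw [if_neg h1]
        by_cases h2 : i' = i ∧ j' = j ∧ c' < t
        · obtain ⟨e1, e2, e3⟩ := h2
          subst e1 e2
          rw [if_pos ⟨rfl, rfl, e3⟩, if_pos ⟨rfl, rfl, by omega⟩]
        · rw [if_neg h2, if_neg (by
            rintro ⟨e1, e2, e3⟩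
            by_cases hct : c' = t
            · exact h1 ⟨e1, e2, hct⟩
            · exact h2 ⟨e1, e2, by omega⟩)]
    cases hgij : pvG sp i j with
    | false =>
      rw [if_pos (by rw [hgd, hgij]; exact fun h => by simp at h)]
      rw [hup' t (by omega), hleft' t (by omega)]
      apply hfin
      rw [pvF_interior (pvG sp) hi hj t, hgij, if_pos rfl]
    | true =>
      rw [if_neg (by rw [hgd, hgij]; simp)]
      by_cases ht0 : 0 < t
      · rw [if_pos (by exact_mod_cast ht0)]
        have hct : ((t : Nat) : Int) - 1 = ((t - 1 : Nat) : Int) := by omega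
        rw [hct, hup' (t - 1) (by omega), hleft' (t - 1) (by omega)]
        apply hfin
        rw [pvF_interior (pvG sp) hi hj t, hgij, if_neg (by simp), if_pos ht0]
      · rw [if_neg (by exact_mod_cast ht0)]
        apply pvTab_congr
        intro i' hi' j' hj' c' hc'
        have ht' : t = 0 := by omega
        subst ht'
        by_cases h2 : i' = i ∧ j' = j ∧ c' < 1
        · obtain ⟨e1, e2, e3⟩ := h2
          subst e1 e2
          have e3' : c' = 0 := by omega
          subst e3'
          rw [if_neg (by omega), if_pos ⟨rfl, rfl, by omega⟩, hcell 0 (by omega),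
            pvF_interior (pvG sp) hi hj 0, hgij]
          simp
        · rw [if_neg (by rintro ⟨e1, e2, e3⟩; exact h2 ⟨e1, e2, by omega⟩), if_neg h2]

theorem pv_fill_middle (sp : List (List Bool)) (N Mn K1 : Nat)
    (f : Nat → Nat → Nat → Int) (i : Nat) (hi : 0 < i) (hiN : i < N)
    (hrowup : ∀ j < Mn, ∀ c < K1, f (i - 1) j c = pvF (pvG sp) (i - 1) j c)
    (hcol0 : ∀ c < K1, f i 0 c = pvF (pvG sp) i 0 c)
    (hinterior : ∀ j, 1 ≤ j → j < Mn → ∀ c < K1, f i j c = 0)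
    (t : Nat) (ht : t + 1 ≤ Mn) :
    (List.range t).foldl
      (fun dp (u : Nat) =>
        (List.range K1).foldl
          (fun dp (kv : Nat) =>
            if ¬ pvGet2B sp (i : Int) ((u + 1 : Nat) : Int) then
              pvSet3 dp (i : Int) ((u + 1 : Nat) : Int) (kv : Int)
                (PySem.Int.mod (pvGet3 dp ((i : Int) - 1) ((u + 1 : Nat) : Int) (kv : Int)
                  + pvGet3 dp (i : Int) (((u + 1 : Nat) : Int) - 1) (kv : Int)) 1000007)
            else if (kv : Int) > 0 then
              pvSet3 dp (i : Int) ((u + 1 : Nat) : Int) (kv : Int)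
                (PySem.Int.mod (pvGet3 dp ((i : Int) - 1) ((u + 1 : Nat) : Int) ((kv : Int) - 1)
                  + pvGet3 dp (i : Int) (((u + 1 : Nat) : Int) - 1) ((kv : Int) - 1)) 1000007)
            else dp)
          dp)
      (pvTab N Mn K1 f)
    = pvTab N Mn K1 (fun i' j' c' =>
        if i' = i ∧ 1 ≤ j' ∧ j' < t + 1 then pvF (pvG sp) i j' c' else f i' j' c') := by
  induction t with
  | zero =>
    exact (pvTab_congr _ _ _
      (by intro i' hi' j' hj' c' hc'; rw [if_neg (by omega)])).symm
  | succ t ih =>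
    rw [List.range_succ, List.foldl_append, ih (by omega), List.foldl_cons, List.foldl_nil]
    rw [pv_fill_inner sp N Mn K1 _ i (t + 1) hi hiN (by omega) (by omega)
      (by
        intro c hc
        rw [if_neg (by omega)]
        exact hrowup (t + 1) (by omega) c hc)
      (by
        intro c hc
        by_cases h1t : 1 ≤ t
        · rw [if_pos (show i = i ∧ 1 ≤ t + 1 - 1 ∧ t + 1 - 1 < t + 1 from ⟨rfl, by omega, by omega⟩)]
        · have : t = 0 := by omega
          subst this
          rw [if_neg (by omega)]
          exact hcol0 c hc)
      (by
        intro c hc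
        rw [if_neg (by omega)]
        exact hinterior (t + 1) (by omega) (by omega) c hc)
      K1 le_rfl]
    apply pvTab_congr
    intro i' hi' j' hj' c' hc'
    by_cases h1 : i' = i ∧ j' = t + 1
    · obtain ⟨e1, e2⟩ := h1
      subst e1 e2
      rw [if_pos ⟨rfl, rfl, hc'⟩, if_pos ⟨rfl, by omega, by omega⟩]
    · rw [if_neg (by tauto)]
      by_cases h2 : i' = i ∧ 1 ≤ j' ∧ j' < t + 1
      · obtain ⟨e1, e2, e3⟩ := h2
        subst e1
        rw [if_pos ⟨rfl, e2, e3⟩, if_pos ⟨rfl, e2, by omega⟩]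
      · rw [if_neg h2, if_neg (by
          rintro ⟨e1, e2, e3⟩
          by_cases hjt : j' = t + 1
          · exact h1 ⟨e1, hjt⟩
          · exact h2 ⟨e1, e2, by omega⟩)]

theorem pv_fill (sp : List (List Bool)) (N Mn K1 : Nat)
    (f : Nat → Nat → Nat → Int) (hM : 0 < Mn)
    (hrow0 : ∀ j < Mn, ∀ c < K1, f 0 j c = pvF (pvG sp) 0 j c)
    (hcol0 : ∀ i < N, ∀ c < K1, f i 0 c = pvF (pvG sp) i 0 c)
    (hinterior : ∀ i, 1 ≤ i → i < N → ∀ j, 1 ≤ j → j < Mn → ∀ c < K1, f i j c = 0)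
    (t : Nat) (ht : t + 1 ≤ N) :
    (List.range t).foldl
      (fun dp (u : Nat) =>
        (List.range (Mn - 1)).foldl
          (fun dp (w : Nat) =>
            (List.range K1).foldl
              (fun dp (kv : Nat) =>
                if ¬ pvGet2B sp ((u + 1 : Nat) : Int) ((w + 1 : Nat) : Int) then
                  pvSet3 dp ((u + 1 : Nat) : Int) ((w + 1 : Nat) : Int) (kv : Int)
                    (PySem.Int.mod (pvGet3 dp (((u + 1 : Nat) : Int) - 1) ((w + 1 : Nat) : Int) (kv : Int)
                      + pvGet3 dp ((u + 1 : Nat) : Int) (((w + 1 : Nat) : Int) - 1) (kv : Int)) 1000007)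
                else if (kv : Int) > 0 then
                  pvSet3 dp ((u + 1 : Nat) : Int) ((w + 1 : Nat) : Int) (kv : Int)
                    (PySem.Int.mod (pvGet3 dp (((u + 1 : Nat) : Int) - 1) ((w + 1 : Nat) : Int) ((kv : Int) - 1)
                      + pvGet3 dp ((u + 1 : Nat) : Int) (((w + 1 : Nat) : Int) - 1) ((kv : Int) - 1)) 1000007)
                else dp)
              dp)
          dp)
      (pvTab N Mn K1 f)
    = pvTab N Mn K1 (fun i' j' c' =>
        if 1 ≤ i' ∧ i' < t + 1 ∧ 1 ≤ j' then pvF (pvG sp) i' j' c' else f i' j' c') := by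
  induction t with
  | zero =>
    exact (pvTab_congr _ _ _
      (by intro i' hi' j' hj' c' hc'; rw [if_neg (by omega)])).symm
  | succ t ih =>
    rw [List.range_succ, List.foldl_append, ih (by omega), List.foldl_cons, List.foldl_nil]
    rw [pv_fill_middle sp N Mn K1 _ (t + 1) (by omega) (by omega)
      (by
        intro j hj c hc
        simp only [Nat.add_sub_cancel]
        by_cases h1t : 1 ≤ t ∧ 1 ≤ j
        · rw [if_pos ⟨h1t.1, by omega, h1t.2⟩]
        · rw [if_neg (by omega)]
          by_cases hj0 : j = 0
          · subst hj0
            exact hcol0 t (by omega) c hc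
          · have : t = 0 := by omega
            subst this
            exact hrow0 j hj c hc)
      (by
        intro c hc
        rw [if_neg (by omega)]
        exact hcol0 (t + 1) (by omega) c hc)
      (by
        intro j hj1 hjM c hc
        rw [if_neg (by omega)]
        exact hinterior (t + 1) (by omega) (by omega) j hj1 hjM c hc)
      (Mn - 1) (by omega)]
    apply pvTab_congr
    intro i' hi' j' hj' c' hc'
    by_cases h1 : i' = t + 1 ∧ 1 ≤ j'
    · obtain ⟨e1, e2⟩ := h1
      subst e1
      rw [if_pos ⟨rfl, e2, by omega⟩, if_pos ⟨by omega, by omega, e2⟩]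
    · rw [if_neg (by
        rintro ⟨e1, e2, e3⟩
        exact h1 ⟨e1, e2⟩)]
      by_cases h2 : 1 ≤ i' ∧ i' < t + 1 ∧ 1 ≤ j'
      · obtain ⟨e1, e2, e3⟩ := h2
        rw [if_pos ⟨e1, e2, e3⟩, if_pos ⟨e1, by omega, e3⟩]
      · rw [if_neg h2, if_neg (by
          rintro ⟨e1, e2, e3⟩
          by_cases hit : i' = t + 1
          · exact h1 ⟨hit, e3⟩
          · exact h2 ⟨e1, by omega, e3⟩)]

-- ===== B-side characterization =====
theorem pvE_lt (g : Nat → Nat → Bool) (i j c : Nat) (h : c < pvS g i j) :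
    pvE g i j c = 0 := by
  have hs1 : pvS g i j = 1 := by unfold pvS at *; split_ifs at * <;> omega
  have hc0 : c = 0 := by omega
  subst hc0
  rcases i with _ | i <;> rcases j with _ | j <;> rw [pvE] <;>
    first
      | (rw [if_neg (by omega)])
      | (rw [if_pos (by omega)])

theorem pvE_step (g : Nat → Nat → Bool) {i j : Nat} (h : 0 < i ∨ 0 < j) (c : Nat)
    (hcs : pvS g i j ≤ c) :
    pvE g i j c = PySem.Int.mod
      ((if 0 < i then pvE g (i - 1) j (c - pvS g i j) else 0)
        + (if 0 < j then pvE g i (j - 1) (c - pvS g i j) else 0)) 1000007 := by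
  rcases i with _ | i <;> rcases j with _ | j
  · omega
  · rw [pvE, if_neg (by omega), if_neg (by omega), if_pos (by omega)]
    rfl
  · rw [pvE, if_neg (by omega), if_pos (by omega), if_neg (by omega)]
    rfl
  · rw [pvE, if_neg (by omega), if_pos (by omega), if_pos (by omega)]
    rfl

def pvRowE (sp : List (List Bool)) (Mn K1 : Nat) (i : Nat) : List (List Int) :=
  (List.range Mn).map (fun j => (List.range K1).map (fun c => pvE (pvG sp) i j c))

theorem pv_b_row (sp : List (List Bool)) (Mn K1 : Nat) (i : Nat)
    (prev : List (List Int))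
    (hprev : i = 0 ∨ prev = pvRowE sp Mn K1 (i - 1))
    (t : Nat) (ht : t ≤ Mn) :
    (List.range t).foldl
      (fun cur (j : Nat) =>
        let s : Int := if pvGet2B sp (i : Int) (j : Int) then 1 else 0
        let cell := (List.range K1).map (fun (c : Nat) =>
          if (c : Int) < s then 0
          else if ((i : Int) == 0) && ((j : Int) == 0) then (if (c : Int) == s then 1 else 0)
          else PySem.Int.mod
            ((if (i : Int) > 0 then
                PySem.List.pyGetD (PySem.List.pyGetD prev (j : Int) []) ((c : Int) - s) 0 else 0)
              + (if (j : Int) > 0 then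
                  PySem.List.pyGetD (PySem.List.pyGetD cur ((j : Int) - 1) []) ((c : Int) - s) 0
                 else 0)) 1000007)
        cur ++ [cell]) []
    = (List.range t).map (fun j => (List.range K1).map (fun c => pvE (pvG sp) i j c)) := by
  induction t with
  | zero => rfl
  | succ t ih =>
    rw [List.range_succ, List.foldl_append, ih (by omega), List.foldl_cons, List.foldl_nil,
      List.map_append]
    simp only [List.map_cons, List.map_nil]
    refine congrArg _ ?_
    refine congrArg (fun x => [x]) ?_
    apply List.map_congr_left
    intro c hc
    simp only [List.mem_range] at hc
    have hsg : (if pvGet2B sp (i : Int) (t : Int) then (1 : Int) else 0)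
        = ((pvS (pvG sp) i t : Nat) : Int) := by
      unfold pvS pvG
      split_ifs <;> simp
    rw [hsg]
    by_cases hlt : c < pvS (pvG sp) i t
    · rw [if_pos (by exact_mod_cast hlt), pvE_lt _ _ _ _ hlt]
    · rw [if_neg (by exact_mod_cast hlt)]
      have hcast : ((c : Nat) : Int) - ((pvS (pvG sp) i t : Nat) : Int)
          = ((c - pvS (pvG sp) i t : Nat) : Int) := by omega
      have hcK : c - pvS (pvG sp) i t < K1 := by omega
      by_cases hi0 : i = 0 <;> by_cases ht0 : t = 0
      · subst hi0 ht0
        simp only [Nat.cast_zero, BEq.rfl, Bool.and_self, if_true]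
        rw [pvE]
        by_cases hcs : c = pvS (pvG sp) 0 0
        · subst hcs
          simp
        · rw [if_neg hcs, if_neg (by
            intro h
            exact hcs (by exact_mod_cast (beq_iff_eq.mp h)))]
      · -- i = 0, t > 0 : only the left (same-row) term contributes
        subst hi0
        rw [if_neg (by
          simp only [Bool.and_eq_true, beq_iff_eq]
          intro h
          exact ht0 (by exact_mod_cast h.2))]
        rw [if_neg (by norm_num), if_pos (by exact_mod_cast Nat.pos_of_ne_zero ht0)]
        rw [show ((t : Nat) : Int) - 1 = ((t - 1 : Nat) : Int) from by
          have := Nat.pos_of_ne_zero ht0; omega, hcast]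
        simp only [PySem.List.pyGetD_natCast]
        rw [pv_getD_map_range t (t - 1) _ _ (by
            have := Nat.pos_of_ne_zero ht0; omega),
          pv_getD_map_range K1 (c - pvS (pvG sp) 0 t) _ _ hcK]
        rw [pvE_step (pvG sp) (Or.inr (Nat.pos_of_ne_zero ht0)) c (by omega)]
        rw [if_neg (by omega), if_pos (Nat.pos_of_ne_zero ht0)]
      · -- i > 0, t = 0 : only the upper term contributes
        subst ht0
        rw [if_neg (by
          simp only [Bool.and_eq_true, beq_iff_eq]
          intro h
          exact hi0 (by exact_mod_cast h.1))]
        rw [if_pos (by exact_mod_cast Nat.pos_of_ne_zero hi0), if_neg (by norm_num)]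
        rcases hprev with h | h
        · exact absurd h hi0
        · rw [h]
          unfold pvRowE
          rw [hcast]
          simp only [PySem.List.pyGetD_natCast]
          rw [pv_getD_map_range Mn 0 _ _ (by omega),
            pv_getD_map_range K1 (c - pvS (pvG sp) i 0) _ _ hcK]
          rw [pvE_step (pvG sp) (Or.inl (Nat.pos_of_ne_zero hi0)) c (by omega)]
          rw [if_pos (Nat.pos_of_ne_zero hi0), if_neg (by omega)]
      · -- i > 0 and t > 0
        rw [if_neg (by
          simp only [Bool.and_eq_true, beq_iff_eq]
          intro h
          exact hi0 (by exact_mod_cast h.1))]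
        rw [if_pos (by exact_mod_cast Nat.pos_of_ne_zero hi0),
          if_pos (by exact_mod_cast Nat.pos_of_ne_zero ht0)]
        rcases hprev with h | h
        · exact absurd h hi0
        · rw [h]
          unfold pvRowE
          rw [show ((t : Nat) : Int) - 1 = ((t - 1 : Nat) : Int) from by
            have := Nat.pos_of_ne_zero ht0; omega, hcast]
          simp only [PySem.List.pyGetD_natCast]
          rw [pv_getD_map_range Mn t _ _ (by omega),
            pv_getD_map_range K1 (c - pvS (pvG sp) i t) _ _ hcK,
            pv_getD_map_range t (t - 1) _ _ (by
              have := Nat.pos_of_ne_zero ht0; omega),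
            pv_getD_map_range K1 (c - pvS (pvG sp) i t) _ _ hcK]
          rw [pvE_step (pvG sp) (Or.inl (Nat.pos_of_ne_zero hi0)) c (by omega)]
          rw [if_pos (Nat.pos_of_ne_zero hi0), if_pos (Nat.pos_of_ne_zero ht0)]

theorem pv_b_grid (sp : List (List Bool)) (N Mn K1 : Nat)
    (t : Nat) (ht : t ≤ N) :
    (List.range t).foldl
      (fun prev (i : Nat) =>
        (List.range Mn).foldl
          (fun cur (j : Nat) =>
            let s : Int := if pvGet2B sp (i : Int) (j : Int) then 1 else 0
            let cell := (List.range K1).map (fun (c : Nat) =>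
              if (c : Int) < s then 0
              else if ((i : Int) == 0) && ((j : Int) == 0) then (if (c : Int) == s then 1 else 0)
              else PySem.Int.mod
                ((if (i : Int) > 0 then
                    PySem.List.pyGetD (PySem.List.pyGetD prev (j : Int) []) ((c : Int) - s) 0 else 0)
                  + (if (j : Int) > 0 then
                      PySem.List.pyGetD (PySem.List.pyGetD cur ((j : Int) - 1) []) ((c : Int) - s) 0
                     else 0)) 1000007)
            cur ++ [cell]) [])
      []
    = (if t = 0 then [] else pvRowE sp Mn K1 (t - 1)) := by
  induction t with
  | zero => rfl
  | succ t ih =>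
    rw [List.range_succ, List.foldl_append, ih (by omega), List.foldl_cons, List.foldl_nil]
    simp only []
    rw [if_neg (Nat.succ_ne_zero t), Nat.add_sub_cancel]
    by_cases ht0 : t = 0
    · subst ht0
      rw [if_pos rfl]
      exact pv_b_row sp Mn K1 0 [] (Or.inl rfl) Mn le_rfl
    · rw [if_neg ht0]
      exact pv_b_row sp Mn K1 t (pvRowE sp Mn K1 (t - 1)) (Or.inr rfl) Mn le_rfl

-- ===== arithmetic relation between the two DPs =====
theorem pv_mod_eq (a : Int) : PySem.Int.mod a 1000007 = a % 1000007 :=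
  PySem.Int.mod_eq_emod_of_pos (by norm_num)

theorem pvE_row (g : Nat → Nat → Bool) (j c : Nat) :
    pvE g 0 j c = if c = pvRCp g (j + 1) then 1 else 0 := by
  induction j generalizing c with
  | zero =>
    rw [pvE]
    have : pvRCp g 1 = pvS g 0 0 := by simp [pvRCp]
    rw [this]
  | succ j ih =>
    rw [pvE, ih]
    rw [show pvRCp g (j + 1 + 1) = pvRCp g (j + 1) + pvS g 0 (j + 1) from rfl]
    cases hg : g 0 (j + 1)
    · have hs : pvS g 0 (j + 1) = 0 := by simp [pvS, hg]
      rw [hs, if_neg (by omega), Nat.sub_zero, Nat.add_zero]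
      by_cases hcr : c = pvRCp g (j + 1)
      · rw [if_pos hcr, if_pos (by omega)]
        decide
      · rw [if_neg hcr, if_neg (by omega)]
        decide
    · have hs : pvS g 0 (j + 1) = 1 := by simp [pvS, hg]
      rw [hs]
      by_cases hc0 : c < 1
      · rw [if_pos hc0, if_neg (by omega)]
      · rw [if_neg hc0]
        by_cases hcr : c - 1 = pvRCp g (j + 1)
        · rw [if_pos hcr, if_pos (by omega)]
          decide
        · rw [if_neg hcr, if_neg (by omega)]
          decide

theorem pvE_col (g : Nat → Nat → Bool) (i c : Nat) :
    pvE g i 0 c = if c = pvCCp g (i + 1) then 1 else 0 := by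
  induction i generalizing c with
  | zero =>
    rw [pvE]
    have : pvCCp g 1 = pvS g 0 0 := by simp [pvCCp]
    rw [this]
  | succ i ih =>
    rw [pvE, ih]
    rw [show pvCCp g (i + 1 + 1) = pvCCp g (i + 1) + pvS g (i + 1) 0 from rfl]
    cases hg : g (i + 1) 0
    · have hs : pvS g (i + 1) 0 = 0 := by simp [pvS, hg]
      rw [hs, if_neg (by omega), Nat.sub_zero, Nat.add_zero]
      by_cases hcr : c = pvCCp g (i + 1)
      · rw [if_pos hcr, if_pos (by omega)]
        decide
      · rw [if_neg hcr, if_neg (by omega)]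
        decide
    · have hs : pvS g (i + 1) 0 = 1 := by simp [pvS, hg]
      rw [hs]
      by_cases hc0 : c < 1
      · rw [if_pos hc0, if_neg (by omega)]
      · rw [if_neg hc0]
        by_cases hcr : c - 1 = pvCCp g (i + 1)
        · rw [if_pos hcr, if_pos (by omega)]
          decide
        · rw [if_neg hcr, if_neg (by omega)]
          decide

theorem pvE_bounds (g : Nat → Nat → Bool) (i j c : Nat) :
    0 ≤ pvE g i j c ∧ pvE g i j c < 1000007 := by
  have key : ∀ a : Int, 0 ≤ PySem.Int.mod a 1000007 ∧ PySem.Int.mod a 1000007 < 1000007 := by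
    intro a
    rw [pv_mod_eq]
    exact ⟨Int.emod_nonneg _ (by norm_num), Int.emod_lt_of_pos _ (by norm_num)⟩
  rcases i with _ | i <;> rcases j with _ | j <;> rw [pvE] <;> split_ifs <;>
    first
      | exact key _
      | (constructor <;> norm_num)

theorem pvF_eq_sum (g : Nat → Nat → Bool) (i j c : Nat) :
    pvF g i j c = (∑ x ∈ Finset.range (c + 1), pvE g i j x) % 1000007 := by
  induction i generalizing j c with
  | zero =>
    rw [pvF]
    simp only [pvE_row]
    rw [Finset.sum_ite_eq' (Finset.range (c + 1)) (pvRCp g (j + 1)) (fun _ => (1 : Int))]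
    by_cases h : pvRCp g (j + 1) ≤ c
    · rw [if_pos h, if_pos (by simp only [Finset.mem_range]; omega)]
      norm_num
    · rw [if_neg h, if_neg (by simp only [Finset.mem_range]; omega)]
      norm_num
  | succ i ihi =>
    induction j generalizing c with
    | zero =>
      rw [pvF]
      simp only [pvE_col]
      rw [Finset.sum_ite_eq' (Finset.range (c + 1)) (pvCCp g (i + 1 + 1)) (fun _ => (1 : Int)),
        show pvCCp g (i + 1 + 1) = pvCCp g (i + 2) from rfl]
      by_cases h : pvCCp g (i + 2) ≤ c
      · rw [if_pos h, if_pos (by simp only [Finset.mem_range]; omega)]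
        norm_num
      · rw [if_neg h, if_neg (by simp only [Finset.mem_range]; omega)]
        norm_num
    | succ j ihj =>
      rw [pvF]
      cases hg : g (i + 1) (j + 1)
      · have hs : pvS g (i + 1) (j + 1) = 0 := by simp [pvS, hg]
        rw [if_pos rfl, ihi (j + 1) c, ihj c, pv_mod_eq, ← Int.add_emod]
        have hE : ∀ x : Nat, pvE g (i + 1) (j + 1) x
            = (pvE g i (j + 1) x + pvE g (i + 1) j x) % 1000007 := by
          intro x
          rw [pvE, hs, if_neg (by omega), Nat.sub_zero, pv_mod_eq]
        rw [Finset.sum_congr rfl (fun x _ => hE x), ← Finset.sum_int_mod,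
          Finset.sum_add_distrib]
      · have hs : pvS g (i + 1) (j + 1) = 1 := by simp [pvS, hg]
        rw [if_neg (by simp)]
        by_cases hc0 : 0 < c
        · rw [if_pos hc0, ihi (j + 1) (c - 1), ihj (c - 1), pv_mod_eq, ← Int.add_emod]
          have hE0 : pvE g (i + 1) (j + 1) 0 = 0 := pvE_lt g _ _ 0 (by omega)
          have hES : ∀ x : Nat, pvE g (i + 1) (j + 1) (x + 1)
              = (pvE g i (j + 1) x + pvE g (i + 1) j x) % 1000007 := by
            intro x
            rw [pvE, hs, if_neg (by omega), Nat.add_sub_cancel, pv_mod_eq]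
          conv_rhs => rw [show c + 1 = (c - 1 + 1) + 1 from by omega, Finset.sum_range_succ']
          rw [hE0, add_zero, Finset.sum_congr rfl (fun x _ => hES x), ← Finset.sum_int_mod,
            Finset.sum_add_distrib]
        · rw [if_neg hc0]
          have hc : c = 0 := by omega
          subst hc
          rw [Finset.sum_range_one, pvE_lt g _ _ 0 (by omega)]
          norm_num

-- ===== the difference step turns cumulative values back into exact ones =====
theorem pv_point0 (g : Nat → Nat → Bool) (i j : Nat) :
    pvF g i j 0 = pvE g i j 0 := by
  rw [pvF_eq_sum, Finset.sum_range_one]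
  exact Int.emod_eq_of_lt (pvE_bounds g i j 0).1 (pvE_bounds g i j 0).2

theorem pv_pointS (g : Nat → Nat → Bool) (i j c : Nat) (hc : 0 < c) :
    PySem.Int.mod (pvF g i j c - pvF g i j (c - 1)) 1000007 = pvE g i j c := by
  rw [pv_mod_eq, pvF_eq_sum, pvF_eq_sum, ← Int.sub_emod,
    show c - 1 + 1 = c from by omega,
    show c + 1 = c + 1 from rfl, Finset.sum_range_succ]
  rw [add_sub_cancel_left]
  exact Int.emod_eq_of_lt (pvE_bounds g i j c).1 (pvE_bounds g i j c).2

-- ===== the answer-assembly loop of A =====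
theorem pv_ans (sp : List (List Bool)) (N Mn K1 : Nat) (f : Nat → Nat → Nat → Int)
    (hN : 0 < N) (hM : 0 < Mn) (hK : 0 < K1)
    (hf : ∀ c < K1, f (N - 1) (Mn - 1) c = pvF (pvG sp) (N - 1) (Mn - 1) c) :
    (List.range (K1 - 1)).foldl
      (fun a (u : Nat) =>
        PySem.List.pySetD a ((u + 1 : Nat) : Int)
          (PySem.Int.mod
            (pvGet3 (pvTab N Mn K1 f) ((N - 1 : Nat) : Int) ((Mn - 1 : Nat) : Int)
                ((u + 1 : Nat) : Int)
              - pvGet3 (pvTab N Mn K1 f) ((N - 1 : Nat) : Int) ((Mn - 1 : Nat) : Int)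
                  (((u + 1 : Nat) : Int) - 1)) 1000007))
      (PySem.List.pySetD (List.replicate K1 (0 : Int)) 0
        (pvGet3 (pvTab N Mn K1 f) ((N - 1 : Nat) : Int) ((Mn - 1 : Nat) : Int) 0))
    = (List.range K1).map (fun c => pvE (pvG sp) (N - 1) (Mn - 1) c) := by
  have hget : ∀ c < K1,
      pvGet3 (pvTab N Mn K1 f) ((N - 1 : Nat) : Int) ((Mn - 1 : Nat) : Int) ((c : Nat) : Int)
        = pvF (pvG sp) (N - 1) (Mn - 1) c := by
    intro c hc
    rw [pvTab_get _ _ _ _ (by omega) (by omega) hc, hf c hc]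
  have hsuff : ∀ t, t ≤ K1 - 1 →
      (List.range t).foldl
        (fun a (u : Nat) =>
          PySem.List.pySetD a ((u + 1 : Nat) : Int)
            (PySem.Int.mod
              (pvGet3 (pvTab N Mn K1 f) ((N - 1 : Nat) : Int) ((Mn - 1 : Nat) : Int)
                  ((u + 1 : Nat) : Int)
                - pvGet3 (pvTab N Mn K1 f) ((N - 1 : Nat) : Int) ((Mn - 1 : Nat) : Int)
                    (((u + 1 : Nat) : Int) - 1)) 1000007))
        (PySem.List.pySetD (List.replicate K1 (0 : Int)) 0
          (pvGet3 (pvTab N Mn K1 f) ((N - 1 : Nat) : Int) ((Mn - 1 : Nat) : Int) 0))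
      = (List.range K1).map (fun c =>
          if c = 0 then pvF (pvG sp) (N - 1) (Mn - 1) 0
          else if c ≤ t then
            PySem.Int.mod
              (pvF (pvG sp) (N - 1) (Mn - 1) c - pvF (pvG sp) (N - 1) (Mn - 1) (c - 1)) 1000007
          else 0) := by
    intro t
    induction t with
    | zero =>
      intro _
      simp only [List.range_zero, List.foldl_nil]
      rw [show pvGet3 (pvTab N Mn K1 f) ((N - 1 : Nat) : Int) ((Mn - 1 : Nat) : Int) (0 : Int)
            = pvF (pvG sp) (N - 1) (Mn - 1) 0 from by
          rw [show (0 : Int) = ((0 : Nat) : Int) from rfl]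
          exact hget 0 hK]
      rw [show PySem.List.pySetD (List.replicate K1 (0 : Int)) 0
              (pvF (pvG sp) (N - 1) (Mn - 1) 0)
            = (List.replicate K1 (0 : Int)).set 0 (pvF (pvG sp) (N - 1) (Mn - 1) 0) from
          PySem.List.pySetD_of_nonneg _ _ (by norm_num),
        show List.replicate K1 (0 : Int) = (List.range K1).map (fun _ => (0 : Int)) from by
          rw [List.map_const', List.length_range],
        pv_set_map_range]
      apply List.map_congr_left
      intro x hx
      by_cases hx0 : x = 0
      · subst hx0
        rw [if_pos rfl, if_pos rfl]
      · rw [if_neg hx0, if_neg hx0, if_neg (by omega)]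
    | succ t ih =>
      intro ht
      rw [List.range_succ, List.foldl_append, ih (by omega), List.foldl_cons, List.foldl_nil]
      rw [show (((t + 1 : Nat) : Int)) - 1 = ((t : Nat) : Int) from by push_cast; ring,
        hget (t + 1) (by omega), hget t (by omega), PySem.List.pySetD_natCast,
        pv_set_map_range]
      apply List.map_congr_left
      intro x hx
      simp only [List.mem_range] at hx
      by_cases hx1 : x = t + 1
      · subst hx1
        rw [if_pos rfl, if_neg (by omega), if_pos (by omega), Nat.add_sub_cancel]
      · rw [if_neg hx1]
        by_cases hx0 : x = 0
        · subst hx0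
          rw [if_pos rfl, if_pos rfl]
        · rw [if_neg hx0, if_neg hx0]
          by_cases hxt : x ≤ t
          · rw [if_pos hxt, if_pos (by omega)]
          · rw [if_neg hxt, if_neg (by omega)]
  rw [hsuff (K1 - 1) le_rfl]
  apply List.map_congr_left
  intro x hx
  simp only [List.mem_range] at hx
  by_cases hx0 : x = 0
  · subst hx0
    rw [if_pos rfl, pv_point0]
  · rw [if_neg hx0, if_pos (by omega), pv_pointS _ _ _ _ (by omega)]

theorem pvF_col0 (g : Nat → Nat → Bool) (i c : Nat) :
    pvF g i 0 c = if pvCCp g (i + 1) ≤ c then 1 else 0 := by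
  cases i
  · rw [pvF]
    rfl
  · rw [pvF]

-- ===== VERDICT (by name: the statement is the Claim_ definition above) =====
theorem count_paths_with_special_fields_spec : Claim_equal_count_paths_with_special_fields := by
  intro n m k special_fields hdom hpre
  obtain ⟨hn, hm, hk, _⟩ := hpre
  unfold Spec_count_paths_with_special_fields
  unfold count_paths_with_special_fields count_paths_with_special_fields_alt
  rw [pv_pyRange_zero_cast n, pv_pyRange_zero_cast m, pv_pyRange_zero_cast (k + 1),
    pv_pyRange_one_cast n, pv_pyRange_one_cast m, pv_pyRange_one_cast (k + 1)]
  rw [show (n - 1 : Int).toNat = n.toNat - 1 from by omega,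
    show (m - 1 : Int).toNat = m.toNat - 1 from by omega,
    show ((k + 1) - 1 : Int).toNat = (k + 1).toNat - 1 from by omega]
  set sp := pvMkSpecial n m special_fields with hsp
  set N := n.toNat with hNdef
  set Mn := m.toNat with hMdef
  set K1 := (k + 1).toNat with hKdef
  have hN0 : 0 < N := by omega
  have hM0 : 0 < Mn := by omega
  have hK0 : 0 < K1 := by omega
  rw [show (n - 1 : Int) = ((N - 1 : Nat) : Int) from by omega,
    show (m - 1 : Int) = ((Mn - 1 : Nat) : Int) from by omega]
  simp only [List.foldl_map, List.map_map, Function.comp_def]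
  rw [show (List.range N).map
        (fun _ : Nat => (List.range Mn).map
          (fun _ : Nat => (List.range K1).map (fun _ : Nat => (0 : Int))))
      = pvTab N Mn K1 (fun _ _ _ => 0) from rfl]
  rw [pv_rowbase sp N Mn K1 (fun _ _ _ => 0) hN0 K1 le_rfl]
  rw [pv_colbase sp N Mn K1 _ hM0 K1 le_rfl]
  have hrow0 : ∀ j < Mn, ∀ c < K1,
      (if j = 0 ∧ c < K1 ∧ pvCCp (pvG sp) (0 + 1) ≤ c then (1 : Int)
        else if (0 : Nat) = 0 ∧ c < K1 ∧ pvRCp (pvG sp) (j + 1) ≤ c then 1 else 0)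
      = pvF (pvG sp) 0 j c := by
    intro j hj c hc
    rw [pvF]
    by_cases hj0 : j = 0
    · subst hj0
      rw [show pvCCp (pvG sp) (0 + 1) = pvRCp (pvG sp) (0 + 1) from rfl]
      split_ifs <;> first | rfl | omega
    · rw [if_neg (by omega)]
      split_ifs <;> first | rfl | omega
  have hcol0 : ∀ i < N, ∀ c < K1,
      (if (0 : Nat) = 0 ∧ c < K1 ∧ pvCCp (pvG sp) (i + 1) ≤ c then (1 : Int)
        else if i = 0 ∧ c < K1 ∧ pvRCp (pvG sp) (0 + 1) ≤ c then 1 else 0)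
      = pvF (pvG sp) i 0 c := by
    intro i hi c hc
    rw [pvF_col0]
    by_cases hi0 : i = 0
    · subst hi0
      rw [show pvRCp (pvG sp) (0 + 1) = pvCCp (pvG sp) (0 + 1) from rfl]
      split_ifs <;> first | rfl | omega
    · split_ifs <;> first | rfl | omega
  have hint : ∀ i, 1 ≤ i → i < N → ∀ j, 1 ≤ j → j < Mn → ∀ c < K1,
      (if j = 0 ∧ c < K1 ∧ pvCCp (pvG sp) (i + 1) ≤ c then (1 : Int)
        else if i = 0 ∧ c < K1 ∧ pvRCp (pvG sp) (j + 1) ≤ c then 1 else 0) = 0 := by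
    intro i hi1 hiN j hj1 hjM c hc
    rw [if_neg (by omega), if_neg (by omega)]
  rw [pv_fill sp N Mn K1 _ hM0
    (by
      intro j hj c hc
      exact hrow0 j hj c hc)
    (by
      intro i hi c hc
      exact hcol0 i hi c hc)
    (by
      intro i hi1 hiN j hj1 hjM c hc
      exact hint i hi1 hiN j hj1 hjM c hc)
    (N - 1) (by omega)]
  rw [pvTab_congr N Mn K1 (f' := pvF (pvG sp)) (by
    intro i hi j hj c hc
    by_cases h1 : 1 ≤ i ∧ 1 ≤ j
    · rw [if_pos ⟨h1.1, by omega, h1.2⟩]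
    · rw [if_neg (by tauto)]
      by_cases hj0 : j = 0
      · subst hj0
        exact hcol0 i hi c hc
      · have hi0 : i = 0 := by omega
        subst hi0
        exact hrow0 j hj c hc)]
  rw [pv_ans sp N Mn K1 (pvF (pvG sp)) hN0 hM0 hK0 (fun c _ => rfl)]
  rw [pv_b_grid sp N Mn K1 N le_rfl, if_neg (by omega)]
  rw [pvRowE]
  rw [PySem.List.pyGetD_natCast, pv_getD_map_range Mn (Mn - 1) _ _ (by omega)]
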